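-- pv_equiv track=rewrite | github.com/just-jay/advent-of-code-2023 | day_7-1.py | canBeat
-- ===== SOURCE A (Python) =====
-- def canBeat(a,r):
-- 	curr = 0
-- 	for i in range (int(a)+1):
-- 		dist = i * (int(a)-i)
-- 		if dist > int(r):
-- 			curr += 1
-- 	if curr == 0:
-- 		return 1
-- 	else:
-- 		return curr
-- ===== SOURCE B (Python) =====
-- def _isqrt(n):
--     # largest x with x*x <= n, for n >= 0 (binary search; no imports, like A)
--     lo, hi = 0, n + 1
--     while hi - lo > 1:
--         mid = (lo + hi) // 2
--         if mid * mid <= n: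
--             lo = mid
--         else:
--             hi = mid
--     return lo
--
--
-- def canBeat(a, r):
--     # i*(a-i) > r  <=>  (2*i - a)**2 < a*a - 4*r ; count lattice points of the
--     # open root interval intersected with [0, a], in O(log a) instead of O(a).
--     d = a * a - 4 * r
--     if a < 0 or d <= 0:
--         return 1
--     s = _isqrt(d - 1)
--     lo = max(0, (a - s + 1) // 2)
--     hi = min(a, (a + s) // 2)
--     cnt = hi - lo + 1
--     return cnt if cnt > 0 else 1
-- ===== Notes on version B (the rewrite author's own statement) =====
-- stated objective: faster
-- what changed: Replaced A's linear scan of all i in [0,a] by solving the quadratic inequality i*(a-i)>r: a binary-search integer square root gives the root interval, whose lattice points intersected with [0,a] are counted in closed form.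
import Mathlib
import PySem

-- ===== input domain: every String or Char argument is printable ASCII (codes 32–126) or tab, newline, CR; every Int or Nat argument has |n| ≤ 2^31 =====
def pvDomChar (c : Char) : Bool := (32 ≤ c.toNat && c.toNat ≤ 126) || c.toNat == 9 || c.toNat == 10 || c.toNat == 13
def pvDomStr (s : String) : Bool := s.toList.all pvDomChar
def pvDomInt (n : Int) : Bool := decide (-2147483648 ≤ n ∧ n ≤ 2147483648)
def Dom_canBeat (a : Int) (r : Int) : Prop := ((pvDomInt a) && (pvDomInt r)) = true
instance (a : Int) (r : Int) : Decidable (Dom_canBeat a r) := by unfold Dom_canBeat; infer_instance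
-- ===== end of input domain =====

-- B replaces A's O(a) counting loop by an O(log) closed-form count of the integer
-- solutions of the quadratic inequality i*(a-i) > r (objective: faster).

-- ===== PORT A =====
def canBeat (a : Int) (r : Int) : Int :=
  let curr : Int :=
    (PySem.List.pyRange 0 (a + 1) 1).foldl
      (fun curr i =>
        let dist := i * (a - i)
        if dist > r then curr + 1 else curr) 0
  if curr = 0 then 1 else curr

-- ===== PORT B =====
-- binary-search integer square root from Source B: largest x with x*x ≤ n (n ≥ 0)
def isqrtAux (n lo hi : Int) : Int :=
  if _h : 1 < hi - lo then
    let mid := PySem.Int.floordiv (lo + hi) 2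
    if mid * mid ≤ n then isqrtAux n mid hi else isqrtAux n lo mid
  else lo
termination_by (hi - lo).toNat
decreasing_by
  all_goals
    simp only [PySem.Int.floordiv, Int.fdiv_eq_ediv] at *
    omega

def pyIsqrt (n : Int) : Int := isqrtAux n 0 (n + 1)

def canBeat_alt (a : Int) (r : Int) : Int :=
  let d := a * a - 4 * r
  if a < 0 ∨ d ≤ 0 then 1
  else
    let s := pyIsqrt (d - 1)
    let lo := max 0 (PySem.Int.floordiv (a - s + 1) 2)
    let hi := min a (PySem.Int.floordiv (a + s) 2)
    let cnt := hi - lo + 1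
    if cnt > 0 then cnt else 1

-- ===== PRECONDITION & SPEC =====
def Spec_canBeat (a : Int) (r : Int) (out : Int) : Prop := out = canBeat_alt a r
instance (a : Int) (r : Int) (out : Int) : Decidable (Spec_canBeat a r out) := by unfold Spec_canBeat; infer_instance

-- ===== CLAIM (what is proved, stated in full; the proofs are below) =====
def Claim_equal_canBeat : Prop := ∀ (a : Int) (r : Int), Dom_canBeat a r → Spec_canBeat a r (canBeat a r)

-- ===== LEMMAS AND PROOFS =====

-- correctness of the binary-search integer square root
theorem isqrtAux_spec (k : Nat) : ∀ (n lo hi : Int), (hi - lo).toNat ≤ k →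
    0 ≤ lo → lo < hi → lo * lo ≤ n → n < hi * hi →
    0 ≤ isqrtAux n lo hi ∧ isqrtAux n lo hi * isqrtAux n lo hi ≤ n ∧
      n < (isqrtAux n lo hi + 1) * (isqrtAux n lo hi + 1) := by
  induction k with
  | zero =>
    intro n lo hi hk h0 hlt _ _
    omega
  | succ k ih =>
    intro n lo hi hk h0 hlt hlo hhi
    rw [isqrtAux]
    by_cases hgap : 1 < hi - lo
    · simp only [hgap, dif_pos]
      have hmid : PySem.Int.floordiv (lo + hi) 2 = (lo + hi) / 2 := by
        simp [PySem.Int.floordiv, Int.fdiv_eq_ediv]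
      by_cases hc : PySem.Int.floordiv (lo + hi) 2 * PySem.Int.floordiv (lo + hi) 2 ≤ n
      · simp only [hc, if_pos]
        exact ih n _ hi (by omega) (by omega) (by omega) hc hhi
      · simp only [hc, if_neg, not_false_iff]
        exact ih n lo _ (by omega) h0 (by omega) hlo (by omega)
    · simp only [hgap, dif_neg, not_false_iff]
      have : hi = lo + 1 := by omega
      exact ⟨h0, hlo, by rw [this] at hhi; linarith⟩

theorem pyIsqrt_spec (n : Int) (hn : 0 ≤ n) :
    0 ≤ pyIsqrt n ∧ pyIsqrt n * pyIsqrt n ≤ n ∧ n < (pyIsqrt n + 1) * (pyIsqrt n + 1) := by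
  exact isqrtAux_spec (n + 1 - 0).toNat n 0 (n + 1) le_rfl le_rfl (by omega) (by simpa)
    (by nlinarith)

-- A's loop is a countP
theorem canBeat_eq_count (a r : Int) :
    canBeat a r =
      (if ((PySem.List.pyRange 0 (a + 1) 1).countP (fun i => decide (i * (a - i) > r)) : Int) = 0
       then 1
       else ((PySem.List.pyRange 0 (a + 1) 1).countP (fun i => decide (i * (a - i) > r)) : Int)) := by
  unfold canBeat
  have h := PySem.List.foldl_count_if (fun i => decide (i * (a - i) > r))
      (PySem.List.pyRange 0 (a + 1) 1) 0
  simp only [decide_eq_true_eq] at h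
  simp only [gt_iff_lt, h, zero_add]

-- counting an interval inside a range
theorem count_interval (lo hi : Int) : ∀ (k : Nat) (a b : Int), (b - a).toNat ≤ k →
    ((PySem.List.pyRange a b 1).countP (fun x => decide (lo ≤ x ∧ x ≤ hi)) : Int)
      = max 0 (min b (hi + 1) - max a lo) := by
  intro k
  induction k with
  | zero =>
    intro a b hk
    rw [PySem.List.pyRange_one_eq_nil (by omega)]
    simp only [List.countP_nil, Int.natCast_zero]
    omega
  | succ k ih =>
    intro a b hk
    by_cases hab : b ≤ a
    · rw [PySem.List.pyRange_one_eq_nil hab]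
      simp only [List.countP_nil, Int.natCast_zero]
      omega
    · have hb : b = (b - 1) + 1 := by omega
      rw [hb, PySem.List.pyRange_one_succ_right (by omega)]
      rw [List.countP_append]
      have := ih a (b - 1) (by omega)
      by_cases hm : lo ≤ b - 1 ∧ b - 1 ≤ hi
      · simp only [List.countP_cons, List.countP_nil, hm, and_self,
          if_pos, decide_true]
        push_cast
        omega
      · simp only [List.countP_cons, List.countP_nil]
        rw [decide_eq_false hm]
        push_cast
        omega

-- the quadratic inequality is an interval condition
theorem pred_iff_interval (a r s x : Int) (hs0 : 0 ≤ s)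
    (hs1 : s * s ≤ a * a - 4 * r - 1) (hs2 : a * a - 4 * r - 1 < (s + 1) * (s + 1)) :
    (x * (a - x) > r) ↔ (-s ≤ 2 * x - a ∧ 2 * x - a ≤ s) := by
  constructor
  · intro h
    constructor <;> nlinarith [sq_nonneg (2 * x - a)]
  · intro ⟨h1, h2⟩
    nlinarith [sq_nonneg (2 * x - a)]

-- ===== VERDICT (by name: the statement is the Claim_ definition above) =====
theorem canBeat_spec : Claim_equal_canBeat := by
  unfold Claim_equal_canBeat
  intro a r _
  unfold Spec_canBeat
  rw [canBeat_eq_count]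
  unfold canBeat_alt
  by_cases hneg : a < 0 ∨ a * a - 4 * r ≤ 0
  · simp only [hneg, if_pos]
    rcases hneg with hneg | hd
    · rw [PySem.List.pyRange_one_eq_nil (by omega)]
      simp
    · have hz : (PySem.List.pyRange 0 (a + 1) 1).countP
          (fun i => decide (i * (a - i) > r)) = 0 := by
        rw [List.countP_eq_zero]
        intro x _
        simp only [gt_iff_lt, decide_eq_true_eq, not_lt]
        nlinarith [sq_nonneg (2 * x - a)]
      simp [hz]
  · simp only [hneg, if_neg, not_false_iff]
    rw [not_or, not_lt, not_le] at hneg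
    obtain ⟨ha, hd⟩ := hneg
    obtain ⟨hs0, hs1, hs2⟩ := pyIsqrt_spec (a * a - 4 * r - 1) (by omega)
    set s := pyIsqrt (a * a - 4 * r - 1) with hsdef
    have hfd1 : PySem.Int.floordiv (a - s + 1) 2 = (a - s + 1) / 2 := by
      simp [PySem.Int.floordiv, Int.fdiv_eq_ediv]
    have hfd2 : PySem.Int.floordiv (a + s) 2 = (a + s) / 2 := by
      simp [PySem.Int.floordiv, Int.fdiv_eq_ediv]
    have hcnt : ((PySem.List.pyRange 0 (a + 1) 1).countP
        (fun i => decide (i * (a - i) > r)) : Int)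
        = max 0 (min (a + 1) ((a + s) / 2 + 1) - max 0 ((a - s + 1) / 2)) := by
      have hp : ∀ x : Int,
          decide (x * (a - x) > r)
            = decide ((a - s + 1) / 2 ≤ x ∧ x ≤ (a + s) / 2) := by
        intro x
        have h1 := pred_iff_interval a r s x hs0 (by omega) (by omega)
        have h2 : ((a - s + 1) / 2 ≤ x ∧ x ≤ (a + s) / 2)
            ↔ (-s ≤ 2 * x - a ∧ 2 * x - a ≤ s) := by omega
        simp only [decide_eq_decide]
        rw [h1, h2]
      rw [List.countP_congr (fun x _ => by rw [hp x])]
      exact count_interval _ _ (a + 1 - 0).toNat 0 (a + 1) le_rfl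
    rw [hcnt]
    simp only [hfd1, hfd2]
    omega
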